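-- pv_equiv track=rewrite | github.com/IreneKhymych/Algorithms | dz20/20.11/main.py | max_k
-- ===== SOURCE A (Python) =====
-- class SegmentTree:
--     def __init__(self, data):
--         self.n = len(data)
--         self.size = 1
--         while self.size < self.n:
--             self.size *= 2
--         self.t = [float('-inf')] * (2 * self.size)
--         for i in range(self.n):
--             self.t[self.size + i] = data[i]
--         for i in range(self.size - 1, 0, -1):
--             self.t[i] = max(self.t[i << 1], self.t[i << 1 | 1])
--
--     def get_max(self, l, r):
--         l += self.size
--         r += self.size
--         res = float('-inf')
--         while l <= r:
--             if l % 2 == 1: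
--                 res = max(res, self.t[l])
--                 l += 1
--             if r % 2 == 0:
--                 res = max(res, self.t[r])
--                 r -= 1
--             l //= 2
--             r //= 2
--         return res
--
-- def max_k(arr, k):
--     n = len(arr)
--     seg_tree = SegmentTree(arr)
--     count = 0
--     r1 = r2 = 0
--
--     for l in range(n):
--         while r1 < n and seg_tree.get_max(l, r1) < k:
--             r1 += 1
--         if r1 == n or seg_tree.get_max(l, r1) > k:
--             continue
--         r2 = max(r2, r1)
--         while r2 + 1 < n and seg_tree.get_max(l, r2 + 1) == k:
--             r2 += 1
--         count += (r2 - r1 + 1)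
--     return count
-- ===== SOURCE B (Python) =====
-- def max_k(arr, k):
--     # Linear pass: subarrays with max == k = (#suffix-runs all <= k) - (#suffix-runs all < k)
--     total = 0
--     le = 0  # length of current run of elements <= k ending here
--     lt = 0  # length of current run of elements < k ending here
--     for x in arr:
--         le = le + 1 if x <= k else 0
--         lt = lt + 1 if x < k else 0
--         total += le - lt
--     return total
-- ===== Notes on version B (the rewrite author's own statement) =====
-- stated objective: faster
-- what changed: Replaced the segment-tree-backed two-pointer scan by a single linear pass that counts, per right endpoint, the run of elements <= k minus the run of elements < k (their difference is the number of subarrays ending there with max exactly k).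
import Mathlib
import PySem

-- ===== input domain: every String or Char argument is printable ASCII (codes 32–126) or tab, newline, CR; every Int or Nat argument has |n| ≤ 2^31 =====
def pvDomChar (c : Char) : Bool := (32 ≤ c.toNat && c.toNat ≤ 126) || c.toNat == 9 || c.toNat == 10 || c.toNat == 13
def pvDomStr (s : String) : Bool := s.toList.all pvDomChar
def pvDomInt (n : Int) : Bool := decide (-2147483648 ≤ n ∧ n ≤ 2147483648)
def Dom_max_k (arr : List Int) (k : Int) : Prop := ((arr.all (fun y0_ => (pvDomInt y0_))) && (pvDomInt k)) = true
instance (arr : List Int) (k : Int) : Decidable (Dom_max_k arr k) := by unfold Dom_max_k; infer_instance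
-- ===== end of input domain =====

-- B replaces A's segment-tree + two-pointer scan with one linear run-length pass (asymptotically faster).

-- ===== PORT A =====
-- Python's float('-inf') sentinel is ported as `none`; `omax` is Python's max on these values.
def omax : Option Int → Option Int → Option Int
  | none, b => b
  | some x, none => some x
  | some x, some y => some (max x y)

-- comparisons of a tree value (possibly -inf) with k, as in Python
def oltB : Option Int → Int → Bool
  | none, _ => true
  | some v, k => v < k

def ogtB : Option Int → Int → Bool
  | none, _ => false
  | some v, k => k < v

def oeqB : Option Int → Int → Bool
  | none, _ => false
  | some v, k => v == k

-- `while self.size < self.n: self.size *= 2`; fuel n suffices (n ≤ 2^n), proved below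
def segSizeGo : Nat → Nat → Nat → Nat
  | 0, _, size => size
  | f+1, n, size => if size < n then segSizeGo f n (size * 2) else size

-- `for i in range(self.n): self.t[self.size + i] = data[i]`
def leafLoop (size : Nat) (arr : List Int) (t : List (Option Int)) : List (Option Int) :=
  (List.range arr.length).foldl (fun t i => t.set (size + i) (some (arr.getD i 0))) t

-- `for i in range(self.size - 1, 0, -1): self.t[i] = max(self.t[i<<1], self.t[i<<1|1])`
def buildLoop : List (Option Int) → Nat → List (Option Int)
  | t, 0 => t
  | t, i+1 => buildLoop (t.set (i+1) (omax (t.getD (2*(i+1)) none) (t.getD (2*(i+1)+1) none))) i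

-- the `while l <= r` query loop; fuel is only a totality guard, never exhausted at the call sites
-- (indices are Nat: at every call l ≥ size ≥ 1, so Python's ints stay nonnegative and // is Nat division)
def queryGo (t : List (Option Int)) : Nat → Nat → Nat → Option Int → Option Int
  | 0, _, _, res => res
  | f+1, l, r, res =>
    if l ≤ r then
      let res1 := if l % 2 = 1 then omax res (t.getD l none) else res
      let l1 := if l % 2 = 1 then l + 1 else l
      let res2 := if r % 2 = 0 then omax res1 (t.getD r none) else res1
      let r1 := if r % 2 = 0 then r - 1 else r
      queryGo t f (l1 / 2) (r1 / 2) res2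
    else res

def getMax (size : Nat) (t : List (Option Int)) (l r : Nat) : Option Int :=
  queryGo t (r + size + 1) (l + size) (r + size) none

-- `while r1 < n and seg_tree.get_max(l, r1) < k: r1 += 1`
def whileR1 (n : Nat) (k : Int) (size : Nat) (t : List (Option Int)) (l : Nat) (r1 : Nat) : Nat :=
  if h : r1 < n ∧ oltB (getMax size t l r1) k then whileR1 n k size t l (r1+1) else r1
termination_by n - r1
decreasing_by omega

-- `while r2 + 1 < n and seg_tree.get_max(l, r2 + 1) == k: r2 += 1`
def whileR2 (n : Nat) (k : Int) (size : Nat) (t : List (Option Int)) (l : Nat) (r2 : Nat) : Nat :=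
  if h : r2 + 1 < n ∧ oeqB (getMax size t l (r2+1)) k then whileR2 n k size t l (r2+1) else r2
termination_by n - r2
decreasing_by omega

-- one iteration of `for l in range(n)` over the state (count, r1, r2)
def aStep (n : Nat) (k : Int) (size : Nat) (t : List (Option Int)) (s : Int × Nat × Nat) (l : Nat) :
    Int × Nat × Nat :=
  let count := s.1
  let r1 := whileR1 n k size t l s.2.1
  if r1 = n ∨ ogtB (getMax size t l r1) k then (count, r1, s.2.2)
  else
    let r2 := whileR2 n k size t l (max s.2.2 r1)
    (count + ((r2 : Int) - (r1 : Int) + 1), r1, r2)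

def max_k (arr : List Int) (k : Int) : Int :=
  let n := arr.length
  let size := segSizeGo n n 1
  let t := buildLoop (leafLoop size arr (List.replicate (2*size) none)) (size - 1)
  ((List.range n).foldl (aStep n k size t) (0, 0, 0)).1

-- ===== PORT B =====
def bStep (k : Int) (s : Int × Int × Int) (x : Int) : Int × Int × Int :=
  let le := if x ≤ k then s.2.1 + 1 else 0
  let lt := if x < k then s.2.2 + 1 else 0
  (s.1 + (le - lt), le, lt)

def max_k_alt (arr : List Int) (k : Int) : Int :=
  (arr.foldl (bStep k) (0, 0, 0)).1

-- ===== PRECONDITION & SPEC =====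
def Spec_max_k (arr : List Int) (k : Int) (out : Int) : Prop := out = max_k_alt arr k
instance (arr : List Int) (k : Int) (out : Int) : Decidable (Spec_max_k arr k out) := by unfold Spec_max_k; infer_instance

-- ===== CLAIM (what is proved, stated in full; the proofs are below) =====
def Claim_equal_max_k : Prop := ∀ (arr : List Int) (k : Int), Dom_max_k arr k → Spec_max_k arr k (max_k arr k)

-- ===== LEMMAS AND PROOFS =====
-- omax algebra
theorem omax_none_right (a : Option Int) : omax a none = a := by cases a <;> rfl
theorem omax_none_left (a : Option Int) : omax none a = a := rfl
theorem omax_assoc (a b c : Option Int) : omax (omax a b) c = omax a (omax b c) := by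
  cases a <;> cases b <;> cases c <;> simp [omax, max_assoc]
theorem omax_comm (a b : Option Int) : omax a b = omax b a := by
  cases a <;> cases b <;> simp [omax, max_comm]

-- segSize facts
theorem segSizeGo_ge (f n size : Nat) (h1 : 1 ≤ size) (h2 : n ≤ size * 2 ^ f) :
    n ≤ segSizeGo f n size ∧ 1 ≤ segSizeGo f n size := by
  induction f generalizing size with
  | zero => simp [segSizeGo]; omega
  | succ f ih =>
    simp only [segSizeGo]
    split
    · exact ih (size * 2) (by omega) (by rw [pow_succ] at h2; nlinarith)
    · omega

theorem segSize_ge (n : Nat) : n ≤ segSizeGo n n 1 ∧ 1 ≤ segSizeGo n n 1 :=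
  segSizeGo_ge n n 1 le_rfl (by simpa using (Nat.lt_two_pow_self (n := n)).le)
-- the intended value of tree node j: leaf value / subtree maximum
def leafVal (arr : List Int) (size j : Nat) : Option Int :=
  if size ≤ j ∧ j < size + arr.length then some (arr.getD (j - size) 0) else none

def subMax (arr : List Int) (size : Nat) (j : Nat) : Option Int :=
  if j = 0 then none
  else if size ≤ j then leafVal arr size j
  else omax (subMax arr size (2*j)) (subMax arr size (2*j+1))
termination_by size - j
decreasing_by all_goals omega

theorem subMax_leaf (arr : List Int) (size j : Nat) (h : size ≤ j) (h1 : 1 ≤ size) :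
    subMax arr size j = leafVal arr size j := by
  rw [subMax]; simp only [if_pos h]; rw [if_neg (by omega)]

theorem subMax_node (arr : List Int) (size j : Nat) (h0 : 1 ≤ j) (h : j < size) :
    subMax arr size j = omax (subMax arr size (2*j)) (subMax arr size (2*j+1)) := by
  rw [subMax]; rw [if_neg (by omega), if_neg (by omega)]

-- lengths
theorem leafLoop_length (size : Nat) (arr : List Int) (t : List (Option Int)) :
    (leafLoop size arr t).length = t.length := by
  unfold leafLoop
  induction List.range arr.length generalizing t with
  | nil => rfl
  | cons a as ih => rw [List.foldl_cons, ih]; simp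

-- after the leaf loop, every leaf slot holds its value, everything at index ≥ size is correct
theorem leafLoop_getD (size : Nat) (arr : List Int) (hn : arr.length ≤ size) :
    ∀ j, size ≤ j → j < 2*size →
      (leafLoop size arr (List.replicate (2*size) none)).getD j none = leafVal arr size j := by
  unfold leafLoop
  suffices h : ∀ m, m ≤ arr.length → ∀ j, size ≤ j → j < 2*size →
      ((List.range m).foldl (fun t i => t.set (size + i) (some (arr.getD i 0)))
        (List.replicate (2*size) none)).getD j none =
      (if j < size + m then some (arr.getD (j - size) 0) else none) by
    intro j hj hj2
    rw [h arr.length le_rfl j hj hj2]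
    have hiff : (size ≤ j ∧ j < size + arr.length) ↔ (j < size + arr.length) := by omega
    simp [leafVal, hiff]
  intro m hm
  induction m with
  | zero =>
    intro j hj hj2
    rw [if_neg (by omega)]
    simp [List.getD]
  | succ m ih =>
    intro j hj hj2
    rw [List.range_succ, List.foldl_append]
    simp only [List.foldl_cons, List.foldl_nil]
    have hlen : ((List.range m).foldl (fun t i => t.set (size + i) (some (arr.getD i 0)))
        (List.replicate (2*size) none)).length = 2*size := by
      have : ∀ (l : List Nat) (t : List (Option Int)),
          (l.foldl (fun t i => t.set (size + i) (some (arr.getD i 0))) t).length = t.length := by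
        intro l; induction l with
        | nil => intro t; rfl
        | cons a as ih2 => intro t; rw [List.foldl_cons, ih2]; simp
      rw [this, List.length_replicate]
    by_cases hjm : j = size + m
    · subst hjm
      rw [List.getD_eq_getElem?_getD, List.getElem?_set_self (by omega)]
      rw [if_pos (by omega)]
      simp
    · rw [List.getD_eq_getElem?_getD, List.getElem?_set_ne (by omega)]
      rw [← List.getD_eq_getElem?_getD, ih (by omega) j hj hj2]
      have hne : j ≠ size + m := hjm
      by_cases h2 : j < size + m
      · rw [if_pos h2, if_pos (by omega)]
      · rw [if_neg h2, if_neg (by omega)]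
-- buildLoop computes subtree maxima at every internal node
theorem buildLoop_correct (arr : List Int) (size : Nat) :
    ∀ (i : Nat) (t : List (Option Int)), t.length = 2*size → i < size →
    (∀ j, i < j → j < 2*size → t.getD j none = subMax arr size j) →
    ∀ j, 1 ≤ j → j < 2*size → (buildLoop t i).getD j none = subMax arr size j := by
  intro i
  induction i with
  | zero => intro t _ _ h j hj hj2; exact h j (by omega) hj2
  | succ i ih =>
    intro t hlen hi h j hj hj2
    rw [buildLoop]
    apply ih _ (by simpa using hlen) (by omega) _ j hj hj2
    intro j' hj' hj2'
    by_cases hje : j' = i + 1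
    · subst hje
      rw [List.getD_eq_getElem?_getD, List.getElem?_set_self (by omega)]
      simp only [Option.getD_some]
      rw [h (2*(i+1)) (by omega) (by omega), h (2*(i+1)+1) (by omega) (by omega)]
      exact (subMax_node arr size (i+1) (by omega) (by omega)).symm
    · rw [List.getD_eq_getElem?_getD, List.getElem?_set_ne (by omega)]
      rw [← List.getD_eq_getElem?_getD]
      exact h j' (by omega) hj2'

-- the fully built tree
theorem build_correct (arr : List Int) (size : Nat) (hn : arr.length ≤ size) (h1 : 1 ≤ size) :
    ∀ j, 1 ≤ j → j < 2*size →
      (buildLoop (leafLoop size arr (List.replicate (2*size) none)) (size - 1)).getD j none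
        = subMax arr size j := by
  intro j hj hj2
  rcases Nat.eq_or_lt_of_le h1 with h1' | h1'
  · -- size = 1 : no internal nodes, buildLoop does nothing
    have hsz : size - 1 = 0 := by omega
    rw [hsz, buildLoop]
    rw [leafLoop_getD size arr hn j (by omega) hj2]
    exact (subMax_leaf arr size j (by omega) h1).symm
  · apply buildLoop_correct arr size (size - 1) _
      (by rw [leafLoop_length]; simp) (by omega)
    intro j' hj' hj2'
    rw [leafLoop_getD size arr hn j' (by omega) hj2']
    exact (subMax_leaf arr size j' (by omega) h1).symm
    exact hj
    exact hj2
-- join of subMax over a contiguous block of nodes [l, r]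
def rmax (arr : List Int) (size : Nat) (l r : Nat) : Option Int :=
  (List.range' l (r+1-l)).foldl (fun a i => omax a (subMax arr size i)) none

theorem foldl_omax_acc (g : Nat → Option Int) (xs : List Nat) :
    ∀ a, xs.foldl (fun a i => omax a (g i)) a = omax a (xs.foldl (fun a i => omax a (g i)) none) := by
  induction xs with
  | nil => intro a; simp [omax_none_right]
  | cons x xs ih =>
    intro a
    simp only [List.foldl_cons]
    rw [ih (omax a (g x)), ih (omax none (g x)), omax_none_left, omax_assoc]

theorem rmax_empty (arr : List Int) (size : Nat) (l r : Nat) (h : r < l) :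
    rmax arr size l r = none := by
  unfold rmax
  rw [show r + 1 - l = 0 by omega]
  rfl

theorem rmax_cons (arr : List Int) (size : Nat) (l r : Nat) (h : l ≤ r) :
    rmax arr size l r = omax (subMax arr size l) (rmax arr size (l+1) r) := by
  unfold rmax
  rw [show r + 1 - l = (r - l) + 1 by omega, List.range'_succ]
  simp only [List.foldl_cons]
  rw [foldl_omax_acc, omax_none_left, show r + 1 - (l+1) = r - l by omega]

theorem rmax_concat (arr : List Int) (size : Nat) (l r : Nat) (h : l ≤ r) (h0 : 1 ≤ l) :
    rmax arr size l r = omax (rmax arr size l (r-1)) (subMax arr size r) := by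
  unfold rmax
  rw [show r + 1 - l = (r - l) + 1 by omega, List.range'_1_concat, List.foldl_append]
  simp only [List.foldl_cons, List.foldl_nil]
  rw [show l + (r - l) = r by omega, show r - 1 + 1 - l = r - l by omega]

-- pairing: a block of children [2a, 2b+1] joins to the parent block [a, b]
theorem rmax_pair (arr : List Int) (size : Nat) :
    ∀ (m a b : Nat), b + 1 - a ≤ m → 1 ≤ a → b < size →
      rmax arr size (2*a) (2*b+1) = rmax arr size a b := by
  intro m
  induction m with
  | zero =>
    intro a b hm ha hb
    rw [rmax_empty _ _ _ _ (by omega), rmax_empty _ _ _ _ (by omega)]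
  | succ m ih =>
    intro a b hm ha hb
    by_cases hab : a ≤ b
    · rw [rmax_cons arr size (2*a) (2*b+1) (by omega),
          rmax_cons arr size (2*a+1) (2*b+1) (by omega),
          rmax_cons arr size a b hab]
      rw [← omax_assoc, ← subMax_node arr size a ha (by omega)]
      rw [show 2*a+1+1 = 2*(a+1) by omega]
      rw [ih (a+1) b (by omega) (by omega) hb]
    · rw [rmax_empty _ _ _ _ (by omega), rmax_empty _ _ _ _ (by omega)]

theorem omax_left_comm (a b c : Option Int) : omax a (omax b c) = omax b (omax a c) := by
  rw [← omax_assoc, omax_comm a b, omax_assoc]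

-- main query lemma: queryGo joins res with the block maximum
theorem queryGo_eq (arr : List Int) (size : Nat) (t : List (Option Int))
    (ht : ∀ j, 1 ≤ j → j < 2*size → t.getD j none = subMax arr size j) :
    ∀ (f l r : Nat) (res : Option Int), r < f → 1 ≤ l → r < 2*size →
      queryGo t f l r res = omax res (rmax arr size l r) := by
  intro f
  induction f with
  | zero => intro l r res h; omega
  | succ f ih =>
    intro l r res hf hl hr
    rw [queryGo]
    by_cases hlr : l ≤ r
    · rw [if_pos hlr]
      by_cases hlp : l % 2 = 1 <;> by_cases hrp : r % 2 = 0 <;>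
        simp only [if_pos, if_neg, hlp, hrp, if_true, if_false, reduceIte]
      · -- l odd, r even : take both
        rw [ht l (by omega) (by omega), ht r (by omega) (by omega)]
        rw [ih ((l+1)/2) ((r-1)/2) _ (by omega) (by omega) (by omega)]
        have hlr' : l < r := by omega
        rw [rmax_cons arr size l r hlr, rmax_concat arr size (l+1) r (by omega) (by omega)]
        by_cases hlr1 : l + 1 ≤ r - 1
        · have h1 : l + 1 = 2*((l+1)/2) := by omega
          have h2 : r - 1 = 2*((r-1)/2)+1 := by omega
          rw [show rmax arr size (l+1) (r-1) = rmax arr size (2*((l+1)/2)) (2*((r-1)/2)+1) by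
            rw [← h1, ← h2]]
          rw [rmax_pair arr size (((r-1)/2)+1) ((l+1)/2) ((r-1)/2) (by omega) (by omega) (by omega)]
          simp [omax_assoc, omax_comm, omax_left_comm]
        · rw [rmax_empty arr size (l+1) (r-1) (by omega),
              rmax_empty arr size ((l+1)/2) ((r-1)/2) (by omega)]
          simp [omax_assoc, omax_comm, omax_left_comm, omax_none_left, omax_none_right]
      · -- l odd, r odd : take l
        rw [ht l (by omega) (by omega)]
        rw [ih ((l+1)/2) (r/2) _ (by omega) (by omega) (by omega)]
        rw [rmax_cons arr size l r hlr]
        by_cases hlr1 : l + 1 ≤ r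
        · have h1 : l + 1 = 2*((l+1)/2) := by omega
          have h2 : r = 2*(r/2)+1 := by omega
          rw [show rmax arr size (l+1) r = rmax arr size (2*((l+1)/2)) (2*(r/2)+1) by
            rw [← h1, ← h2]]
          rw [rmax_pair arr size ((r/2)+1) ((l+1)/2) (r/2) (by omega) (by omega) (by omega)]
          simp [omax_assoc, omax_comm, omax_left_comm]
        · rw [rmax_empty arr size (l+1) r (by omega),
              rmax_empty arr size ((l+1)/2) (r/2) (by omega)]
          simp [omax_assoc, omax_comm, omax_left_comm, omax_none_left, omax_none_right]
      · -- l even, r even : take r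
        rw [ht r (by omega) (by omega)]
        rw [ih (l/2) ((r-1)/2) _ (by omega) (by omega) (by omega)]
        rw [rmax_concat arr size l r hlr hl]
        by_cases hlr1 : l ≤ r - 1
        · have h1 : l = 2*(l/2) := by omega
          have h2 : r - 1 = 2*((r-1)/2)+1 := by omega
          rw [show rmax arr size l (r-1) = rmax arr size (2*(l/2)) (2*((r-1)/2)+1) by
            rw [← h1, ← h2]]
          rw [rmax_pair arr size (((r-1)/2)+1) (l/2) ((r-1)/2) (by omega) (by omega) (by omega)]
          simp [omax_assoc, omax_comm, omax_left_comm]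
        · rw [rmax_empty arr size l (r-1) (by omega),
              rmax_empty arr size (l/2) ((r-1)/2) (by omega)]
          simp [omax_assoc, omax_comm, omax_left_comm, omax_none_left, omax_none_right]
      · -- l even, r odd : take nothing
        rw [ih (l/2) (r/2) _ (by omega) (by omega) (by omega)]
        have h1 : l = 2*(l/2) := by omega
        have h2 : r = 2*(r/2)+1 := by omega
        rw [show rmax arr size l r = rmax arr size (2*(l/2)) (2*(r/2)+1) by rw [← h1, ← h2]]
        rw [rmax_pair arr size ((r/2)+1) (l/2) (r/2) (by omega) (by omega) (by omega)]
    · rw [if_neg hlr, rmax_empty arr size l r (by omega), omax_none_right]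
-- maximum of arr over the index interval [l, r]
def fM (arr : List Int) (l r : Nat) : Option Int :=
  (List.range' l (r+1-l)).foldl (fun a i => omax a (some (arr.getD i 0))) none

theorem foldl_omax_acc' {α : Type} (g : α → Option Int) (xs : List α) :
    ∀ a, xs.foldl (fun a i => omax a (g i)) a = omax a (xs.foldl (fun a i => omax a (g i)) none) := by
  induction xs with
  | nil => intro a; simp [omax_none_right]
  | cons x xs ih =>
    intro a
    simp only [List.foldl_cons]
    rw [ih (omax a (g x)), ih (omax none (g x)), omax_none_left, omax_assoc]

theorem rmax_shift (arr : List Int) (size : Nat) (h1 : 1 ≤ size) :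
    ∀ (c l : Nat), l + c ≤ arr.length →
      (List.range' (size + l) c).foldl (fun a i => omax a (subMax arr size i)) none =
      (List.range' l c).foldl (fun a i => omax a (some (arr.getD i 0))) none := by
  intro c
  induction c with
  | zero => intro l _; rfl
  | succ c ih =>
    intro l hc
    rw [List.range'_succ, List.range'_succ]
    simp only [List.foldl_cons]
    rw [foldl_omax_acc', foldl_omax_acc' (fun i => some (arr.getD i 0))]
    rw [show size + l + 1 = size + (l+1) by omega, ih (l+1) (by omega)]
    rw [subMax_leaf arr size (size+l) (by omega) h1]
    unfold leafVal
    rw [if_pos (by omega)]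
    rw [show size + l - size = l by omega]

theorem getMax_eq (arr : List Int) (size : Nat) (t : List (Option Int))
    (hn : arr.length ≤ size) (h1 : 1 ≤ size)
    (ht : ∀ j, 1 ≤ j → j < 2*size → t.getD j none = subMax arr size j)
    (l r : Nat) (hl : l ≤ arr.length) (hr : r < arr.length) :
    getMax size t l r = fM arr l r := by
  unfold getMax
  rw [queryGo_eq arr size t ht (r+size+1) (l+size) (r+size) none (by omega) (by omega) (by omega)]
  rw [omax_none_left]
  unfold rmax fM
  rw [show r + size + 1 - (l + size) = r + 1 - l by omega]
  rw [show l + size = size + l by omega]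
  exact rmax_shift arr size h1 (r+1-l) l (by omega)

-- characterization of fM
def listMax (xs : List Int) : Option Int := xs.foldl (fun a x => omax a (some x)) none

theorem listMax_cons (x : Int) (xs : List Int) : listMax (x :: xs) = omax (some x) (listMax xs) := by
  unfold listMax
  simp only [List.foldl_cons]
  rw [foldl_omax_acc' some xs (omax none (some x)), omax_none_left]

theorem listMax_none_iff (xs : List Int) : listMax xs = none ↔ xs = [] := by
  cases xs with
  | nil => simp [listMax]
  | cons x xs =>
    rw [listMax_cons]
    cases h : listMax xs <;> simp [omax]

theorem listMax_some_iff (xs : List Int) :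
    ∀ (v : Int), listMax xs = some v ↔ v ∈ xs ∧ ∀ x ∈ xs, x ≤ v := by
  induction xs with
  | nil => intro v; simp [listMax]
  | cons x xs ih =>
    intro v
    rw [listMax_cons]
    cases h : listMax xs with
    | none =>
      have hnil : xs = [] := (listMax_none_iff xs).mp h
      subst hnil
      simp only [listMax, List.foldl_nil, omax, List.mem_cons, List.not_mem_nil, or_false,
        List.mem_singleton, Option.some.injEq, List.forall_mem_cons, List.forall_mem_nil,
        and_true]
      constructor
      · intro he
        exact ⟨he.symm, fun y hy => by rw [hy, he]⟩
      · rintro ⟨he, _⟩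
        exact he.symm
    | some w =>
      obtain ⟨hwmem, hwbd⟩ := (ih w).mp h
      simp only [omax]
      constructor
      · intro he
        have hv : max x w = v := by injection he
        constructor
        · rcases max_choice x w with hm | hm
          · rw [← hv, hm]; exact List.mem_cons_self ..
          · rw [← hv, hm]; exact List.mem_cons_of_mem _ hwmem
        · intro y hy
          rcases List.mem_cons.mp hy with hy | hy
          · rw [hy, ← hv]; exact le_max_left x w
          · exact le_trans (hwbd y hy) (by rw [← hv]; exact le_max_right x w)
      · rintro ⟨hv, hb⟩
        have h1 : x ≤ v := hb x (List.mem_cons_self ..)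
        have h2 : w ≤ v := hb w (List.mem_cons_of_mem _ hwmem)
        have h3 : v ≤ max x w := by
          rcases List.mem_cons.mp hv with hy | hy
          · rw [hy]; exact le_max_left x w
          · exact le_trans (hwbd v hy) (le_max_right x w)
        rw [le_antisymm (max_le h1 h2) h3]

theorem fM_eq_listMax (arr : List Int) (l r : Nat) :
    fM arr l r = listMax ((List.range' l (r+1-l)).map (fun i => arr.getD i 0)) := by
  unfold fM listMax
  rw [List.foldl_map]
-- interval predicates on arr (all indices via getD, interval [l,r])
abbrev pLT (arr : List Int) (k : Int) (l r : Nat) : Prop := ∀ i ∈ Finset.Icc l r, arr.getD i 0 < k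
abbrev pLE (arr : List Int) (k : Int) (l r : Nat) : Prop := ∀ i ∈ Finset.Icc l r, arr.getD i 0 ≤ k
abbrev pGT (arr : List Int) (k : Int) (l r : Nat) : Prop := ∃ i ∈ Finset.Icc l r, k < arr.getD i 0
abbrev hasK (arr : List Int) (k : Int) (l r : Nat) : Prop := ∃ i ∈ Finset.Icc l r, arr.getD i 0 = k
abbrev pEQ (arr : List Int) (k : Int) (l r : Nat) : Prop := pLE arr k l r ∧ hasK arr k l r

theorem mem_seg_iff (arr : List Int) (l r : Nat) (x : Int) :
    x ∈ (List.range' l (r+1-l)).map (fun i => arr.getD i 0) ↔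
      ∃ i ∈ Finset.Icc l r, arr.getD i 0 = x := by
  simp only [List.mem_map, List.mem_range'_1, Finset.mem_Icc]
  constructor
  · rintro ⟨i, ⟨h1, h2⟩, h3⟩; exact ⟨i, ⟨h1, by omega⟩, h3⟩
  · rintro ⟨i, ⟨h1, h2⟩, h3⟩; exact ⟨i, ⟨h1, by omega⟩, h3⟩

theorem seg_nil_iff (arr : List Int) (l r : Nat) :
    (List.range' l (r+1-l)).map (fun i => arr.getD i 0) = [] ↔ r + 1 ≤ l := by
  rw [List.map_eq_nil_iff, List.range'_eq_nil_iff]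
  omega

theorem oltB_fM_iff (arr : List Int) (k : Int) (l r : Nat) :
    oltB (fM arr l r) k = true ↔ pLT arr k l r := by
  rw [fM_eq_listMax]
  unfold pLT
  cases hx : listMax ((List.range' l (r+1-l)).map (fun i => arr.getD i 0)) with
  | none =>
    have hnil := (listMax_none_iff _).mp hx
    rw [seg_nil_iff] at hnil
    simp only [oltB, true_iff]
    intro i hi
    rw [Finset.mem_Icc] at hi
    omega
  | some v =>
    obtain ⟨hm, hb⟩ := (listMax_some_iff _ v).mp hx
    simp only [oltB, decide_eq_true_eq]
    constructor
    · intro hv i hi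
      have : arr.getD i 0 ∈ _ := (mem_seg_iff arr l r _).mpr ⟨i, hi, rfl⟩
      exact lt_of_le_of_lt (hb _ this) hv
    · intro h
      obtain ⟨i, hi, hiv⟩ := (mem_seg_iff arr l r v).mp hm
      rw [← hiv]
      exact h i hi

theorem ogtB_fM_iff (arr : List Int) (k : Int) (l r : Nat) :
    ogtB (fM arr l r) k = true ↔ pGT arr k l r := by
  rw [fM_eq_listMax]
  unfold pGT
  cases hx : listMax ((List.range' l (r+1-l)).map (fun i => arr.getD i 0)) with
  | none =>
    have hnil := (listMax_none_iff _).mp hx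
    rw [seg_nil_iff] at hnil
    simp only [ogtB]
    rw [show (false = true) ↔ False by simp]
    rw [false_iff]
    rintro ⟨i, hi, _⟩
    rw [Finset.mem_Icc] at hi
    omega
  | some v =>
    obtain ⟨hm, hb⟩ := (listMax_some_iff _ v).mp hx
    simp only [ogtB, decide_eq_true_eq]
    constructor
    · intro hv
      obtain ⟨i, hi, hiv⟩ := (mem_seg_iff arr l r v).mp hm
      exact ⟨i, hi, by rw [hiv]; exact hv⟩
    · rintro ⟨i, hi, hik⟩
      have : arr.getD i 0 ∈ _ := (mem_seg_iff arr l r _).mpr ⟨i, hi, rfl⟩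
      exact lt_of_lt_of_le hik (hb _ this)

theorem fM_eq_some_iff (arr : List Int) (k : Int) (l r : Nat) :
    fM arr l r = some k ↔ pEQ arr k l r := by
  rw [fM_eq_listMax]
  unfold pEQ pLE hasK
  rw [listMax_some_iff]
  constructor
  · rintro ⟨hm, hb⟩
    refine ⟨?_, (mem_seg_iff arr l r k).mp hm⟩
    intro i hi
    exact hb _ ((mem_seg_iff arr l r _).mpr ⟨i, hi, rfl⟩)
  · rintro ⟨hle, hk⟩
    refine ⟨(mem_seg_iff arr l r k).mpr hk, ?_⟩
    intro x hx
    obtain ⟨i, hi, hiv⟩ := (mem_seg_iff arr l r x).mp hx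
    rw [← hiv]
    exact hle i hi

theorem oeqB_iff (m : Option Int) (k : Int) : oeqB m k = true ↔ m = some k := by
  cases m <;> simp [oeqB]

-- characterization of the two while loops
theorem whileR1_spec (n : Nat) (k : Int) (size : Nat) (t : List (Option Int)) (l : Nat) :
    ∀ r0, r0 ≤ n →
      r0 ≤ whileR1 n k size t l r0 ∧ whileR1 n k size t l r0 ≤ n ∧
      (∀ r, r0 ≤ r → r < whileR1 n k size t l r0 → oltB (getMax size t l r) k = true) ∧
      (whileR1 n k size t l r0 = n ∨
        (whileR1 n k size t l r0 < n ∧ oltB (getMax size t l (whileR1 n k size t l r0)) k = false)) := by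
  suffices h : ∀ d r0, n - r0 ≤ d → r0 ≤ n →
      r0 ≤ whileR1 n k size t l r0 ∧ whileR1 n k size t l r0 ≤ n ∧
      (∀ r, r0 ≤ r → r < whileR1 n k size t l r0 → oltB (getMax size t l r) k = true) ∧
      (whileR1 n k size t l r0 = n ∨
        (whileR1 n k size t l r0 < n ∧ oltB (getMax size t l (whileR1 n k size t l r0)) k = false)) by
    intro r0 h0
    exact h n r0 (by omega) h0
  intro d
  induction d with
  | zero =>
    intro r0 hd h0
    have : r0 = n := by omega
    rw [whileR1, dif_neg (by omega)]
    refine ⟨le_rfl, h0, by omega, Or.inl this⟩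
  | succ d ih =>
    intro r0 hd h0
    rw [whileR1]
    by_cases hc : r0 < n ∧ oltB (getMax size t l r0) k = true
    · rw [dif_pos hc]
      obtain ⟨h1, h2, h3, h4⟩ := ih (r0+1) (by omega) (by omega)
      refine ⟨by omega, h2, ?_, h4⟩
      intro r hr1 hr2
      rcases Nat.eq_or_lt_of_le hr1 with h | h
      · rw [← h]; exact hc.2
      · exact h3 r (by omega) hr2
    · rw [dif_neg hc]
      refine ⟨le_rfl, h0, by omega, ?_⟩
      by_cases hn' : r0 < n
      · right
        refine ⟨hn', ?_⟩
        rcases Bool.eq_false_or_eq_true (oltB (getMax size t l r0) k) with h | h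
        · exact absurd ⟨hn', h⟩ hc
        · exact h
      · left; omega

theorem whileR2_spec (n : Nat) (k : Int) (size : Nat) (t : List (Option Int)) (l : Nat) :
    ∀ r0, r0 < n →
      r0 ≤ whileR2 n k size t l r0 ∧ whileR2 n k size t l r0 < n ∧
      (∀ r, r0 < r → r ≤ whileR2 n k size t l r0 → oeqB (getMax size t l r) k = true) ∧
      ¬(whileR2 n k size t l r0 + 1 < n ∧ oeqB (getMax size t l (whileR2 n k size t l r0 + 1)) k = true) := by
  suffices h : ∀ d r0, n - r0 ≤ d → r0 < n →
      r0 ≤ whileR2 n k size t l r0 ∧ whileR2 n k size t l r0 < n ∧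
      (∀ r, r0 < r → r ≤ whileR2 n k size t l r0 → oeqB (getMax size t l r) k = true) ∧
      ¬(whileR2 n k size t l r0 + 1 < n ∧ oeqB (getMax size t l (whileR2 n k size t l r0 + 1)) k = true) by
    intro r0 h0
    exact h n r0 (by omega) h0
  intro d
  induction d with
  | zero => intro r0 hd h0; omega
  | succ d ih =>
    intro r0 hd h0
    rw [whileR2]
    by_cases hc : r0 + 1 < n ∧ oeqB (getMax size t l (r0+1)) k = true
    · rw [dif_pos hc]
      obtain ⟨h1, h2, h3, h4⟩ := ih (r0+1) (by omega) (by omega)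
      refine ⟨by omega, h2, ?_, h4⟩
      intro r hr1 hr2
      rcases Nat.eq_or_lt_of_le hr1 with h | h
      · rw [← h]; exact hc.2
      · exact h3 r (by omega) hr2
    · rw [dif_neg hc]
      exact ⟨le_rfl, h0, by omega, hc⟩

-- monotonicity of the interval predicates
theorem pLT_mono_l (arr : List Int) (k : Int) (l r : Nat) (h : pLT arr k l r) : pLT arr k (l+1) r := by
  intro i hi
  rw [Finset.mem_Icc] at hi
  exact h i (Finset.mem_Icc.mpr (by omega))

theorem pLE_mono_l (arr : List Int) (k : Int) (l r : Nat) (h : pLE arr k l r) : pLE arr k (l+1) r := by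
  intro i hi
  rw [Finset.mem_Icc] at hi
  exact h i (Finset.mem_Icc.mpr (by omega))

theorem pLE_mono_r (arr : List Int) (k : Int) (l r r' : Nat) (hr : r ≤ r') (h : pLE arr k l r') :
    pLE arr k l r := by
  intro i hi
  rw [Finset.mem_Icc] at hi
  exact h i (Finset.mem_Icc.mpr (by omega))

theorem hasK_mono_r (arr : List Int) (k : Int) (l r r' : Nat) (hr : r ≤ r') (h : hasK arr k l r) :
    hasK arr k l r' := by
  obtain ⟨i, hi, hk⟩ := h
  rw [Finset.mem_Icc] at hi
  exact ⟨i, Finset.mem_Icc.mpr (by omega), hk⟩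

-- per-left-endpoint count of subarrays with maximum exactly k
def Acnt (arr : List Int) (k : Int) (l : Nat) : Nat :=
  ((Finset.range arr.length).filter (fun r => l ≤ r ∧ pEQ arr k l r)).card

-- loop invariant for A's main loop (state before processing index l)
def InvA (arr : List Int) (k : Int) (l : Nat) (s : Int × Nat × Nat) : Prop :=
  s.1 = ((Finset.range l).sum (fun l' => ((Acnt arr k l') : Int))) ∧
  s.2.1 ≤ arr.length ∧
  (∀ r, r < s.2.1 → pLT arr k l r) ∧
  ((pLE arr k l s.2.2 ∧ s.2.2 < arr.length) ∨ s.2.2 = 0)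

theorem aStep_inv (arr : List Int) (k : Int) (size : Nat) (t : List (Option Int))
    (hn : arr.length ≤ size) (h1 : 1 ≤ size)
    (ht : ∀ j, 1 ≤ j → j < 2*size → t.getD j none = subMax arr size j)
    (l : Nat) (hl : l < arr.length) (s : Int × Nat × Nat) (hInv : InvA arr k l s) :
    InvA arr k (l+1) (aStep arr.length k size t s l) := by
  obtain ⟨hc, hr1n, hJ1, hJ2⟩ := hInv
  have hgm : ∀ r, r < arr.length → getMax size t l r = fM arr l r := by
    intro r hr
    exact getMax_eq arr size t hn h1 ht l r (by omega) hr
  obtain ⟨w1, w2, w3, w4⟩ := whileR1_spec arr.length k size t l s.2.1 hr1n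
  set r1' := whileR1 arr.length k size t l s.2.1 with hr1'
  have K1 : ∀ r, r < r1' → pLT arr k l r := by
    intro r hr
    by_cases h : r < s.2.1
    · exact hJ1 r h
    · have := w3 r (by omega) hr
      rw [hgm r (by omega), oltB_fM_iff] at this
      exact this
  unfold aStep
  rw [← hr1']
  by_cases hcont : r1' = arr.length ∨ ogtB (getMax size t l r1') k = true
  · rw [if_pos hcont]
    have hA0 : Acnt arr k l = 0 := by
      unfold Acnt
      rw [Finset.card_eq_zero, Finset.filter_eq_empty_iff]
      intro r hrn
      rw [Finset.mem_range] at hrn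
      rintro ⟨hlr, hle, hk⟩
      by_cases hr : r < r1'
      · obtain ⟨i, hi, hik⟩ := hk
        have := K1 r hr i hi
        omega
      · -- r ≥ r1' : then r1' < n and pGT l r1'
        have hr1lt : r1' < arr.length := by omega
        rcases hcont with h | h
        · omega
        · rw [hgm r1' hr1lt, ogtB_fM_iff] at h
          obtain ⟨i, hi, hik⟩ := h
          rw [Finset.mem_Icc] at hi
          have := hle i (Finset.mem_Icc.mpr (by omega))
          omega
    constructor
    · rw [Finset.sum_range_succ, ← hc, hA0]
      simp
    refine ⟨w2, ?_, ?_⟩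
    · intro r hr
      exact pLT_mono_l arr k l r (K1 r hr)
    · rcases hJ2 with ⟨h2, h3⟩ | h2
      · exact Or.inl ⟨pLE_mono_l arr k l _ h2, h3⟩
      · exact Or.inr h2
  · rw [if_neg hcont]
    push_neg at hcont
    obtain ⟨hne, hgt⟩ := hcont
    have hr1lt : r1' < arr.length := by omega
    have hnpgt : ¬ pGT arr k l r1' := by
      rw [← ogtB_fM_iff, ← hgm r1' hr1lt]
      simp [hgt]
    have hnplt : ¬ pLT arr k l r1' := by
      rcases w4 with h | ⟨_, h⟩
      · omega
      · intro hplt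
        have htrue : oltB (getMax size t l r1') k = true := by
          rw [hgm r1' hr1lt, oltB_fM_iff]
          exact hplt
        rw [htrue] at h
        cases h
    have hple : pLE arr k l r1' := by
      intro i hi
      by_contra hgt'
      exact hnpgt ⟨i, hi, by omega⟩
    have hhk : hasK arr k l r1' := by
      unfold pLT at hnplt
      push_neg at hnplt
      obtain ⟨i, hi, hik⟩ := hnplt
      exact ⟨i, hi, le_antisymm (hple i hi) hik⟩
    have hlr1 : l ≤ r1' := by
      obtain ⟨i, hi, _⟩ := hhk
      rw [Finset.mem_Icc] at hi
      omega
    set r2a := max s.2.2 r1' with hr2a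
    have hr2a_lt : r2a < arr.length := by
      rcases hJ2 with ⟨_, h3⟩ | h2 <;> omega
    have hple2a : pLE arr k l r2a := by
      rcases Nat.le_total s.2.2 r1' with h | h
      · rw [hr2a, Nat.max_eq_right h]; exact hple
      · rw [hr2a, Nat.max_eq_left h]
        rcases hJ2 with ⟨h2, _⟩ | h2
        · exact h2
        · rw [h2]; rw [h2] at h; rw [Nat.le_zero] at h; rw [← h]; exact hple
    have hhk2a : hasK arr k l r2a := hasK_mono_r arr k l r1' r2a (by omega) hhk
    obtain ⟨v1, v2, v3, v4⟩ := whileR2_spec arr.length k size t l r2a hr2a_lt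
    set r2' := whileR2 arr.length k size t l r2a with hr2'
    have hEQ : ∀ r, r1' ≤ r → r ≤ r2' → pEQ arr k l r := by
      intro r ha hb
      by_cases hr : r ≤ r2a
      · exact ⟨pLE_mono_r arr k l r r2a hr hple2a, hasK_mono_r arr k l r1' r (by omega) hhk⟩
      · have := v3 r (by omega) hb
        rw [hgm r (by omega), oeqB_iff, fM_eq_some_iff] at this
        exact this
    have hNEQ : ∀ r, r2' < r → r < arr.length → ¬ pEQ arr k l r := by
      intro r ha hb hpeq
      have hstep : pEQ arr k l (r2'+1) := by
        refine ⟨pLE_mono_r arr k l (r2'+1) r (by omega) hpeq.1,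
          hasK_mono_r arr k l r1' (r2'+1) (by omega) hhk⟩
      apply v4
      refine ⟨by omega, ?_⟩
      rw [hgm (r2'+1) (by omega), oeqB_iff, fM_eq_some_iff]
      exact hstep
    have hfilter : (Finset.range arr.length).filter (fun r => l ≤ r ∧ pEQ arr k l r) =
        Finset.Icc r1' r2' := by
      ext r
      rw [Finset.mem_filter, Finset.mem_range, Finset.mem_Icc]
      constructor
      · rintro ⟨hrn, hlr, hpeq⟩
        constructor
        · by_contra hlt
          obtain ⟨i, hi, hik⟩ := hpeq.2
          have := K1 r (by omega) i hi
          omega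
        · by_contra hgt'
          exact hNEQ r (by omega) hrn hpeq
      · rintro ⟨ha, hb⟩
        exact ⟨by omega, by omega, hEQ r ha hb⟩
    have hAcnt : Acnt arr k l = r2' + 1 - r1' := by
      unfold Acnt
      rw [hfilter, Nat.card_Icc]
    refine ⟨?_, by omega, ?_, ?_⟩
    · show s.1 + ((r2' : Int) - (r1' : Int) + 1) = _
      rw [Finset.sum_range_succ, ← hc, hAcnt]
      have : r1' ≤ r2' := by omega
      push_cast [Nat.cast_sub]
      omega
    · intro r hr
      exact pLT_mono_l arr k l r (K1 r hr)
    · exact Or.inl ⟨pLE_mono_l arr k l _ (hEQ r2' (by omega) le_rfl).1, v2⟩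
theorem max_k_eq_total (arr : List Int) (k : Int) :
    max_k arr k = (Finset.range arr.length).sum (fun l => ((Acnt arr k l : Nat) : Int)) := by
  have hsz := segSize_ge arr.length
  set size := segSizeGo arr.length arr.length 1 with hsize
  set t := buildLoop (leafLoop size arr (List.replicate (2*size) none)) (size - 1) with htdef
  have ht := build_correct arr size hsz.1 hsz.2
  have hfold : ∀ m, m ≤ arr.length →
      InvA arr k m ((List.range m).foldl (aStep arr.length k size t) (0, 0, 0)) := by
    intro m
    induction m with
    | zero =>
      intro _
      rw [List.range_zero, List.foldl_nil]
      exact ⟨by simp, by omega, by intro r hr; exact absurd hr (Nat.not_lt_zero r), Or.inr rfl⟩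
    | succ m ih =>
      intro hm
      rw [List.range_succ, List.foldl_append, List.foldl_cons, List.foldl_nil]
      exact aStep_inv arr k size t hsz.1 hsz.2 ht m (by omega) _ (ih (by omega))
  have h := (hfold arr.length le_rfl).1
  show ((List.range arr.length).foldl (aStep arr.length k size t) (0, 0, 0)).1 = _
  rw [h]
-- run lengths as counts of left endpoints (B side)
def runLE (arr : List Int) (k : Int) (j : Nat) : Nat :=
  ((Finset.range j).filter (fun l => pLE arr k l (j-1))).card

def runLT (arr : List Int) (k : Int) (j : Nat) : Nat :=
  ((Finset.range j).filter (fun l => pLT arr k l (j-1))).card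

theorem pLE_split (arr : List Int) (k : Int) (l j : Nat) (h : l < j) :
    pLE arr k l j ↔ (pLE arr k l (j-1) ∧ arr.getD j 0 ≤ k) := by
  unfold pLE
  constructor
  · intro hp
    refine ⟨?_, hp j (Finset.mem_Icc.mpr (by omega))⟩
    intro i hi
    rw [Finset.mem_Icc] at hi
    exact hp i (Finset.mem_Icc.mpr (by omega))
  · rintro ⟨hp, hj⟩ i hi
    rw [Finset.mem_Icc] at hi
    by_cases hij : i = j
    · rw [hij]; exact hj
    · exact hp i (Finset.mem_Icc.mpr (by omega))

theorem pLT_split (arr : List Int) (k : Int) (l j : Nat) (h : l < j) :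
    pLT arr k l j ↔ (pLT arr k l (j-1) ∧ arr.getD j 0 < k) := by
  unfold pLT
  constructor
  · intro hp
    refine ⟨?_, hp j (Finset.mem_Icc.mpr (by omega))⟩
    intro i hi
    rw [Finset.mem_Icc] at hi
    exact hp i (Finset.mem_Icc.mpr (by omega))
  · rintro ⟨hp, hj⟩ i hi
    rw [Finset.mem_Icc] at hi
    by_cases hij : i = j
    · rw [hij]; exact hj
    · exact hp i (Finset.mem_Icc.mpr (by omega))

theorem pLE_self (arr : List Int) (k : Int) (j : Nat) :
    pLE arr k j j ↔ arr.getD j 0 ≤ k := by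
  unfold pLE
  constructor
  · intro hp; exact hp j (Finset.mem_Icc.mpr (by omega))
  · intro hj i hi
    rw [Finset.mem_Icc] at hi
    rw [show i = j by omega]
    exact hj

theorem pLT_self (arr : List Int) (k : Int) (j : Nat) :
    pLT arr k j j ↔ arr.getD j 0 < k := by
  unfold pLT
  constructor
  · intro hp; exact hp j (Finset.mem_Icc.mpr (by omega))
  · intro hj i hi
    rw [Finset.mem_Icc] at hi
    rw [show i = j by omega]
    exact hj

theorem runLE_succ (arr : List Int) (k : Int) (j : Nat) :
    runLE arr k (j+1) = if arr.getD j 0 ≤ k then runLE arr k j + 1 else 0 := by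
  unfold runLE
  rw [show j + 1 - 1 = j by omega]
  by_cases hx : arr.getD j 0 ≤ k
  · rw [if_pos hx]
    have hset : (Finset.range (j+1)).filter (fun l => pLE arr k l j) =
        insert j ((Finset.range j).filter (fun l => pLE arr k l (j-1))) := by
      ext l
      simp only [Finset.mem_insert, Finset.mem_filter, Finset.mem_range]
      constructor
      · rintro ⟨hl, hp⟩
        by_cases hlj : l = j
        · exact Or.inl hlj
        · exact Or.inr ⟨by omega, ((pLE_split arr k l j (by omega)).mp hp).1⟩
      · rintro (hlj | ⟨hl, hp⟩)
        · exact ⟨by omega, by rw [hlj]; exact (pLE_self arr k j).mpr hx⟩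
        · exact ⟨by omega, (pLE_split arr k l j (by omega)).mpr ⟨hp, hx⟩⟩
    rw [hset, Finset.card_insert_of_notMem (by simp [Finset.mem_filter])]
  · rw [if_neg hx]
    rw [Finset.card_eq_zero, Finset.filter_eq_empty_iff]
    intro l hl
    rw [Finset.mem_range] at hl
    intro hp
    by_cases hlj : l = j
    · rw [hlj] at hp; exact hx ((pLE_self arr k j).mp hp)
    · exact hx ((pLE_split arr k l j (by omega)).mp hp).2

theorem runLT_succ (arr : List Int) (k : Int) (j : Nat) :
    runLT arr k (j+1) = if arr.getD j 0 < k then runLT arr k j + 1 else 0 := by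
  unfold runLT
  rw [show j + 1 - 1 = j by omega]
  by_cases hx : arr.getD j 0 < k
  · rw [if_pos hx]
    have hset : (Finset.range (j+1)).filter (fun l => pLT arr k l j) =
        insert j ((Finset.range j).filter (fun l => pLT arr k l (j-1))) := by
      ext l
      simp only [Finset.mem_insert, Finset.mem_filter, Finset.mem_range]
      constructor
      · rintro ⟨hl, hp⟩
        by_cases hlj : l = j
        · exact Or.inl hlj
        · exact Or.inr ⟨by omega, ((pLT_split arr k l j (by omega)).mp hp).1⟩
      · rintro (hlj | ⟨hl, hp⟩)
        · exact ⟨by omega, by rw [hlj]; exact (pLT_self arr k j).mpr hx⟩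
        · exact ⟨by omega, (pLT_split arr k l j (by omega)).mpr ⟨hp, hx⟩⟩
    rw [hset, Finset.card_insert_of_notMem (by simp [Finset.mem_filter])]
  · rw [if_neg hx]
    rw [Finset.card_eq_zero, Finset.filter_eq_empty_iff]
    intro l hl
    rw [Finset.mem_range] at hl
    intro hp
    by_cases hlj : l = j
    · rw [hlj] at hp; exact hx ((pLT_self arr k j).mp hp)
    · exact hx ((pLT_split arr k l j (by omega)).mp hp).2

-- B's fold over the first j elements, in closed form
theorem bFold_closed (arr : List Int) (k : Int) :
    ∀ j, j ≤ arr.length →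
      (arr.take j).foldl (bStep k) (0, 0, 0) =
        ((Finset.range j).sum (fun r => ((runLE arr k (r+1) : Int) - (runLT arr k (r+1) : Int))),
         (runLE arr k j : Int), (runLT arr k j : Int)) := by
  intro j
  induction j with
  | zero => intro _; simp [runLE, runLT]
  | succ j ih =>
    intro hj
    have hx : arr.take (j+1) = arr.take j ++ [arr.getD j 0] := by
      rw [List.take_succ]
      congr 1
      rw [List.getD_eq_getElem?_getD, List.getElem?_eq_getElem (by omega)]
      rfl
    rw [hx, List.foldl_append, ih (by omega), List.foldl_cons, List.foldl_nil]
    unfold bStep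
    simp only []
    rw [Finset.sum_range_succ, runLE_succ, runLT_succ]
    by_cases h1 : arr.getD j 0 ≤ k <;> by_cases h2 : arr.getD j 0 < k
    · rw [if_pos h1, if_pos h2, if_pos h1, if_pos h2]
      push_cast
      refine congrArg (fun z => (z, _, _)) ?_
      ring
    · rw [if_pos h1, if_neg h2, if_pos h1, if_neg h2]
      push_cast
      refine congrArg (fun z => (z, _, _)) ?_
      ring
    · omega
    · rw [if_neg h1, if_neg h2, if_neg h1, if_neg h2]
      push_cast
      refine congrArg (fun z => (z, _, _)) ?_
      ring
def cLE (arr : List Int) (k : Int) (r : Nat) : Nat :=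
  ((Finset.range arr.length).filter (fun l => l ≤ r ∧ pLE arr k l r)).card
def cLT (arr : List Int) (k : Int) (r : Nat) : Nat :=
  ((Finset.range arr.length).filter (fun l => l ≤ r ∧ pLT arr k l r)).card
def cEQ (arr : List Int) (k : Int) (r : Nat) : Nat :=
  ((Finset.range arr.length).filter (fun l => l ≤ r ∧ pEQ arr k l r)).card

theorem runLE_eq_cLE (arr : List Int) (k : Int) (r : Nat) (hr : r < arr.length) :
    runLE arr k (r+1) = cLE arr k r := by
  unfold runLE cLE
  rw [show r + 1 - 1 = r by omega]
  congr 1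
  ext l
  simp only [Finset.mem_filter, Finset.mem_range]
  constructor
  · rintro ⟨h1, h2⟩; exact ⟨by omega, by omega, h2⟩
  · rintro ⟨h1, h2, h3⟩; exact ⟨by omega, h3⟩

theorem runLT_eq_cLT (arr : List Int) (k : Int) (r : Nat) (hr : r < arr.length) :
    runLT arr k (r+1) = cLT arr k r := by
  unfold runLT cLT
  rw [show r + 1 - 1 = r by omega]
  congr 1
  ext l
  simp only [Finset.mem_filter, Finset.mem_range]
  constructor
  · rintro ⟨h1, h2⟩; exact ⟨by omega, by omega, h2⟩
  · rintro ⟨h1, h2, h3⟩; exact ⟨by omega, h3⟩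

theorem cLE_partition (arr : List Int) (k : Int) (r : Nat) :
    cEQ arr k r + cLT arr k r = cLE arr k r := by
  unfold cEQ cLT cLE
  rw [← Finset.card_union_of_disjoint]
  · congr 1
    ext l
    simp only [Finset.mem_union, Finset.mem_filter, Finset.mem_range]
    constructor
    · rintro (⟨h1, h2, h3⟩ | ⟨h1, h2, h3⟩)
      · exact ⟨h1, h2, h3.1⟩
      · exact ⟨h1, h2, fun i hi => le_of_lt (h3 i hi)⟩
    · rintro ⟨h1, h2, h3⟩
      by_cases hlt : pLT arr k l r
      · exact Or.inr ⟨h1, h2, hlt⟩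
      · left
        refine ⟨h1, h2, h3, ?_⟩
        unfold pLT at hlt
        push_neg at hlt
        obtain ⟨i, hi, hik⟩ := hlt
        exact ⟨i, hi, le_antisymm (h3 i hi) hik⟩
  · rw [Finset.disjoint_filter]
    rintro l _ ⟨h1, h2, ⟨i, hi, hik⟩⟩ ⟨_, h4⟩
    have := h4 i hi
    omega

theorem sum_Acnt_eq (arr : List Int) (k : Int) :
    (Finset.range arr.length).sum (fun l => Acnt arr k l) =
      (Finset.range arr.length).sum (fun r => cEQ arr k r) := by
  unfold Acnt cEQ
  have h1 : ∀ l, ((Finset.range arr.length).filter (fun r => l ≤ r ∧ pEQ arr k l r)).card =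
      (Finset.range arr.length).sum (fun r => if l ≤ r ∧ pEQ arr k l r then 1 else 0) := by
    intro l; rw [Finset.card_filter]
  have h2 : ∀ r, ((Finset.range arr.length).filter (fun l => l ≤ r ∧ pEQ arr k l r)).card =
      (Finset.range arr.length).sum (fun l => if l ≤ r ∧ pEQ arr k l r then 1 else 0) := by
    intro r; rw [Finset.card_filter]
  rw [Finset.sum_congr rfl (fun l _ => h1 l), Finset.sum_congr rfl (fun r _ => h2 r)]
  exact Finset.sum_comm

theorem max_k_alt_eq_total (arr : List Int) (k : Int) :
    max_k_alt arr k = (Finset.range arr.length).sum (fun r => ((cEQ arr k r : Nat) : Int)) := by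
  show (arr.foldl (bStep k) (0, 0, 0)).1 = _
  have hfold := bFold_closed arr k arr.length le_rfl
  rw [List.take_length] at hfold
  rw [hfold]
  simp only []
  have hterm : ∀ r ∈ Finset.range arr.length,
      ((runLE arr k (r+1) : Int) - (runLT arr k (r+1) : Int)) = ((cEQ arr k r : Nat) : Int) := by
    intro r hr
    rw [Finset.mem_range] at hr
    rw [runLE_eq_cLE arr k r hr, runLT_eq_cLT arr k r hr]
    have := cLE_partition arr k r
    omega
  exact Finset.sum_congr rfl hterm

-- ===== VERDICT (by name: the statement is the Claim_ definition above) =====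
theorem max_k_spec : Claim_equal_max_k := by
  intro arr k _
  unfold Spec_max_k
  rw [max_k_eq_total, max_k_alt_eq_total]
  have h2 : (((Finset.range arr.length).sum (fun l => Acnt arr k l) : Nat) : Int) =
      (((Finset.range arr.length).sum (fun r => cEQ arr k r) : Nat) : Int) := by
    exact_mod_cast congrArg (fun z : Nat => (z : Int)) (sum_Acnt_eq arr k)
  push_cast at h2
  exact h2
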